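-- pv_equiv track=rewrite | github.com/ElchaabiMohamed/InferCode_SVM | NC-5690-python-files/program_4938.py | prononcable
-- ===== SOURCE A (Python) =====
-- def prononcable(mot):
--   if mot=='':
--     res=True
--   else:
--     res=True
--     Voyelles=['a','e','i','o','u','y']
--     ch=""
--     for i in range(len(mot)):
--       if mot[i] in Voyelles:
--         ch=ch+"1"
--       elif mot[i] not in Voyelles:
--         ch=ch+"0"
--     if "0000" in ch or "1111" in ch :
--       res=False
--   return res
-- ===== SOURCE B (Python) =====
-- def prononcable(mot):
--     if not mot:
--         return True
--     prev = mot[0] in 'aeiouy'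
--     cnt = 1
--     for c in mot[1:]:
--         v = c in 'aeiouy'
--         cnt = cnt + 1 if v == prev else 1
--         if cnt == 4:
--             return False
--         prev = v
--     return True
-- ===== Notes on version B (the rewrite author's own statement) =====
-- stated objective: faster
-- what changed: Instead of building a vowel/consonant classification string by repeated concatenation and then running two substring searches for a length-4 run, B makes a single short-circuiting pass that tracks the previous character's class and the current run length, returning False as soon as a run reaches 4.
import Mathlib
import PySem

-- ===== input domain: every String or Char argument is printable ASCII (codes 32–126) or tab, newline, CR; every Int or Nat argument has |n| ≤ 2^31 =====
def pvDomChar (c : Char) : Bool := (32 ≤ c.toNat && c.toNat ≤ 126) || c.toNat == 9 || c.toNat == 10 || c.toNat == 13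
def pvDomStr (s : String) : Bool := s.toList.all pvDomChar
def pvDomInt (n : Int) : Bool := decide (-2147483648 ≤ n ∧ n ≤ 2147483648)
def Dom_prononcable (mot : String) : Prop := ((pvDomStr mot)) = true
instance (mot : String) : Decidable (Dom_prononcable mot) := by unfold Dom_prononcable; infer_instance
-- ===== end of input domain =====

-- B replaces A's classification-string building plus two substring searches by a single
-- short-circuiting pass tracking the previous character's class and the current run length.

-- ===== PORT A =====
def prononcable (mot : String) : Bool :=
  if mot = "" then
    true
  else
    let voy : List Char := ['a', 'e', 'i', 'o', 'u', 'y']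
    let ch : List Char := mot.toList.foldl
      (fun ch c =>
        if voy.contains c then ch ++ ['1']
        else if !(voy.contains c) then ch ++ ['0']
        else ch) []
    if PySem.Chars.isIn ['0','0','0','0'] ch || PySem.Chars.isIn ['1','1','1','1'] ch then
      false
    else
      true

-- ===== PORT B =====
/-- `c in 'aeiouy'` -/
def pvVow (c : Char) : Bool := "aeiouy".toList.contains c

def pronGo : List Char → Bool → Nat → Bool
  | [], _, _ => true
  | c :: rest, prev, cnt =>
      let v := pvVow c
      let cnt' := if v == prev then cnt + 1 else 1
      if cnt' = 4 then false else pronGo rest v cnt'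

def prononcable_alt (mot : String) : Bool :=
  match mot.toList with
  | [] => true
  | c :: rest => pronGo rest (pvVow c) 1

-- ===== PRECONDITION & SPEC =====
def Spec_prononcable (mot : String) (out : Bool) : Prop := out = prononcable_alt mot
instance (mot : String) (out : Bool) : Decidable (Spec_prononcable mot out) := by unfold Spec_prononcable; infer_instance

-- ===== CLAIM (what is proved, stated in full; the proofs are below) =====
def Claim_equal_prononcable : Prop := ∀ (mot : String), Dom_prononcable mot → Spec_prononcable mot (prononcable mot)

-- ===== LEMMAS AND PROOFS =====

/-- The character class A records: '1' for a vowel (incl. 'y'), '0' otherwise. -/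
def pvCls (c : Char) : Char := if (['a','e','i','o','u','y'] : List Char).contains c then '1' else '0'

/-- B's Bool class rendered as A's classification character. -/
def pvBit (v : Bool) : Char := if v then '1' else '0'

lemma pvCls_eq_bit (c : Char) : pvCls c = pvBit (pvVow c) := by
  have : (['a','e','i','o','u','y'] : List Char).contains c = pvVow c := by
    simp [pvVow]
  rw [pvCls, pvBit, this]

lemma pvBit_inj {v w : Bool} (h : pvBit v = pvBit w) : v = w := by
  cases v <;> cases w <;> simp_all [pvBit]

/-- A's loop builds exactly the classification string. -/
lemma pvCh_eq_map (s : List Char) :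
    s.foldl (fun ch c =>
      if (['a','e','i','o','u','y'] : List Char).contains c then ch ++ ['1']
      else if !((['a','e','i','o','u','y'] : List Char).contains c) then ch ++ ['0']
      else ch) [] = s.map pvCls := by
  have h : (fun (ch : List Char) (c : Char) =>
      if (['a','e','i','o','u','y'] : List Char).contains c then ch ++ ['1']
      else if !((['a','e','i','o','u','y'] : List Char).contains c) then ch ++ ['0']
      else ch) = fun ch c => ch ++ [pvCls c] := by
    funext ch c
    cases hc : (['a','e','i','o','u','y'] : List Char).contains c <;>
      simp only [pvCls, hc, Bool.not_true, Bool.not_false] <;> simp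
  rw [h, PySem.List.foldl_append_singleton_eq_map, List.nil_append]

/-- "some four consecutive characters of s share a class" as A detects it. -/
def pvHasRun (s : List Char) : Prop :=
  List.replicate 4 '0' <:+: s.map pvCls ∨ List.replicate 4 '1' <:+: s.map pvCls

lemma replicate_prefix_cons {x y : Char} {l : List Char} {n : ℕ} :
    List.replicate (n + 1) x <+: y :: l ↔ x = y ∧ List.replicate n x <+: l := by
  rw [List.replicate_succ, List.cons_prefix_cons]

lemma replicate_pref_mono {x : Char} {m n : ℕ} (hmn : m ≤ n) {l : List Char}
    (h : List.replicate n x <+: l) : List.replicate m x <+: l := by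
  refine List.IsPrefix.trans ?_ h
  have := List.take_prefix m (List.replicate n x)
  rwa [List.take_replicate, Nat.min_eq_left hmn] at this

lemma pvCls_cases (c : Char) : pvCls c = '0' ∨ pvCls c = '1' := by
  rw [pvCls]; split <;> simp

lemma pvHasRun_cons (c : Char) (s : List Char) :
    pvHasRun (c :: s) ↔ (List.replicate 3 (pvCls c) <+: s.map pvCls ∨ pvHasRun s) := by
  unfold pvHasRun
  simp only [List.map_cons, List.infix_cons_iff]
  have h4 : (4 : ℕ) = 3 + 1 := rfl
  constructor
  · rintro ((h | h) | (h | h))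
    · rw [h4, replicate_prefix_cons] at h; exact Or.inl (h.1 ▸ h.2)
    · exact Or.inr (Or.inl h)
    · rw [h4, replicate_prefix_cons] at h; exact Or.inl (h.1 ▸ h.2)
    · exact Or.inr (Or.inr h)
  · rintro (h | h | h)
    · rcases pvCls_cases c with h0 | h0
      · exact Or.inl (Or.inl (by rw [h4, replicate_prefix_cons]; exact ⟨h0.symm, h0 ▸ h⟩))
      · exact Or.inr (Or.inl (by rw [h4, replicate_prefix_cons]; exact ⟨h0.symm, h0 ▸ h⟩))
    · exact Or.inl (Or.inr h)
    · exact Or.inr (Or.inr h)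

lemma hasRun_iff_isIn (s : List Char) :
    pvHasRun s ↔ (PySem.Chars.isIn ['0','0','0','0'] (s.map pvCls) ||
                  PySem.Chars.isIn ['1','1','1','1'] (s.map pvCls)) = true := by
  rw [pvHasRun, Bool.or_eq_true, PySem.Chars.isIn_iff_infix, PySem.Chars.isIn_iff_infix]
  constructor
  · rintro (h | h)
    · exact Or.inl (by simpa using h)
    · exact Or.inr (by simpa using h)
  · rintro (h | h)
    · exact Or.inl (by simpa using h)
    · exact Or.inr (by simpa using h)

/-- Invariant of B's loop: having just seen a run of `cnt` (1 ≤ cnt ≤ 3) characters of class `v`,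
    the loop returns true iff that run does not extend to length 4 and no fresh run of 4 occurs. -/
lemma pronGo_spec (s : List Char) : ∀ (v : Bool) (cnt : ℕ), 1 ≤ cnt → cnt ≤ 3 →
    (pronGo s v cnt = true ↔
      ¬ (List.replicate (4 - cnt) (pvBit v) <+: s.map pvCls) ∧ ¬ pvHasRun s) := by
  induction s with
  | nil =>
    intro v cnt h1 h3
    have hne : (4 - cnt) ≠ 0 := by omega
    simp [pronGo, pvHasRun, List.prefix_nil, List.replicate_eq_nil_iff, hne]
  | cons c s ih =>
    intro v cnt h1 h3
    have hmap : (c :: s).map pvCls = pvCls c :: s.map pvCls := rfl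
    have h4c : 4 - cnt = (3 - cnt) + 1 := by omega
    rw [hmap, h4c, replicate_prefix_cons, pvHasRun_cons]
    by_cases hv : pvVow c = v
    · by_cases hcnt : cnt = 3
      · subst hcnt
        have hstep : pronGo (c :: s) v 3 = false := by
          simp only [pronGo, hv, beq_self_eq_true, if_true]
        have hcb : pvCls c = pvBit v := by rw [pvCls_eq_bit, hv]
        rw [hstep]
        simp [hcb, List.nil_prefix]
      · have hstep : pronGo (c :: s) v cnt = pronGo s v (cnt + 1) := by
          have hne4 : ¬ (cnt + 1 = 4) := by omega
          simp only [pronGo, hv, beq_self_eq_true, if_true, if_neg hne4]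
        rw [hstep, ih v (cnt + 1) (by omega) (by omega)]
        have h4 : 4 - (cnt + 1) = 3 - cnt := by omega
        rw [h4]
        have hcb : pvCls c = pvBit v := by rw [pvCls_eq_bit, hv]
        rw [hcb]
        have hmono : List.replicate 3 (pvBit v) <+: s.map pvCls →
            List.replicate (3 - cnt) (pvBit v) <+: s.map pvCls :=
          replicate_pref_mono (by omega)
        simp only [not_or]
        tauto
    · have hstep : pronGo (c :: s) v cnt = pronGo s (pvVow c) 1 := by
        have hbe : (pvVow c == v) = false := by simp [hv]
        simp only [pronGo, hbe]
        norm_num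
      rw [hstep, ih (pvVow c) 1 (by omega) (by omega)]
      have hne : pvBit v ≠ pvCls c := by
        rw [pvCls_eq_bit]; intro h; exact hv (pvBit_inj h).symm
      have h31 : (4 : ℕ) - 1 = 3 := rfl
      rw [h31, ← pvCls_eq_bit]
      simp only [not_or]
      tauto

lemma toList_eq_nil_iff (mot : String) : mot.toList = [] ↔ mot = "" := by
  simp

theorem pron_eq (mot : String) : prononcable mot = prononcable_alt mot := by
  unfold prononcable prononcable_alt
  cases hs : mot.toList with
  | nil =>
    rw [(toList_eq_nil_iff mot).mp hs]
    simp
  | cons c rest =>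
    have hne : ¬ (mot = "") := fun h => by rw [h] at hs; simp at hs
    rw [if_neg hne]
    dsimp only
    rw [pvCh_eq_map]
    have hB : pronGo rest (pvVow c) 1 = true ↔ ¬ pvHasRun (c :: rest) := by
      rw [pronGo_spec rest (pvVow c) 1 (by omega) (by omega), pvHasRun_cons, ← pvCls_eq_bit]
      have h31 : (4 : ℕ) - 1 = 3 := rfl
      rw [h31]
      tauto
    cases hb : (PySem.Chars.isIn ['0','0','0','0'] ((c :: rest).map pvCls) ||
        PySem.Chars.isIn ['1','1','1','1'] ((c :: rest).map pvCls)) with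
    | false =>
      rw [if_neg (by simp)]
      have : ¬ pvHasRun (c :: rest) := fun h => by
        rw [hasRun_iff_isIn] at h; rw [h] at hb; cases hb
      exact ((hB.mpr this).symm)
    | true =>
      rw [if_pos rfl]
      have hr : pvHasRun (c :: rest) := (hasRun_iff_isIn _).mpr hb
      cases hg : pronGo rest (pvVow c) 1 with
      | false => rfl
      | true => exact absurd hr (hB.mp hg)

-- ===== VERDICT (by name: the statement is the Claim_ definition above) =====
theorem prononcable_spec : Claim_equal_prononcable := by
  intro mot _
  exact pron_eq mot
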